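-- pv_equiv track=rewrite | github.com/jacowk/python-projects | dataset-analysis/nypd_arrests/stats_utils.py | add_semi_colons
-- ===== SOURCE A (Python) =====
-- def add_semi_colons(data):
--     new_data = ""
--     for x in data:
--         if x == ',':
--             new_data += "\'"
--             new_data += ","
--             new_data += "\'"
--         else:
--             new_data += x
--     return new_data
-- ===== SOURCE B (Python) =====
-- def add_semi_colons(data):
--     return "','".join(data.split(','))
-- ===== Notes on version B (the rewrite author's own statement) =====
-- stated objective: idiomatic
-- what changed: Replaces the character-by-character branching accumulation with a tokenise-then-rejoin decomposition: split the string on commas and join the segments with a quote-comma-quote separator.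
import Mathlib
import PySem

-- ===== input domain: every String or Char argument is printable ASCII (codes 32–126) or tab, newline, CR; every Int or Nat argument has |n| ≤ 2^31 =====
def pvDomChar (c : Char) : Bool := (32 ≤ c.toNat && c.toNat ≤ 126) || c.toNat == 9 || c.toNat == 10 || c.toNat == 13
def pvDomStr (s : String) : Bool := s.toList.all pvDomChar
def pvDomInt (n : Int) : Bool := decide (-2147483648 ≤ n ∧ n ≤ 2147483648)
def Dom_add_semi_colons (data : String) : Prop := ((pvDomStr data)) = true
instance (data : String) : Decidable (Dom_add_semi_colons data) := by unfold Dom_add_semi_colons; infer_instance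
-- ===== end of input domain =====

-- B rewrites A's per-character accumulation as split-on-comma then rejoin with "','" (idiomatic).

-- ===== PORT A =====
-- the string accumulator new_data is represented as its List Char; += appends
def add_semi_colons (data : String) : String :=
  String.ofList (data.toList.foldl
    (fun new_data x =>
      if x = ',' then ((new_data ++ ['\'']) ++ [',']) ++ ['\'']
      else new_data ++ [x]) [])

-- ===== PORT B =====
def add_semi_colons_alt (data : String) : String :=
  PySem.Str.join "','" ((PySem.Str.split? data ",").getD [])

-- ===== PRECONDITION & SPEC =====
def Spec_add_semi_colons (data : String) (out : String) : Prop := out = add_semi_colons_alt data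
instance (data : String) (out : String) : Decidable (Spec_add_semi_colons data out) := by unfold Spec_add_semi_colons; infer_instance

-- ===== CLAIM (what is proved, stated in full; the proofs are below) =====
def Claim_equal_add_semi_colons : Prop := ∀ (data : String), Dom_add_semi_colons data → Spec_add_semi_colons data (add_semi_colons data)

-- ===== LEMMAS AND PROOFS =====

-- reference splitter: split l on ',' with pending segment pre
def pvSplit (pre : List Char) : List Char → List (List Char)
  | [] => [pre]
  | c :: rest => if c = ',' then pre :: pvSplit [] rest else pvSplit (pre ++ [c]) rest

theorem pvGo_eq_pvSplit (fuel : Nat) (l cur : List Char) (acc : List (List Char))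
    (h : l.length ≤ fuel) :
    PySem.Chars.splitOn.go [','] fuel l cur acc = acc.reverse ++ pvSplit cur.reverse l := by
  induction fuel generalizing l cur acc with
  | zero =>
    have hl : l = [] := List.length_eq_zero_iff.mp (Nat.le_zero.mp h)
    subst hl
    rw [PySem.Chars.splitOn.go.eq_def]
    simp [pvSplit]
  | succ n ih =>
    cases l with
    | nil =>
      rw [PySem.Chars.splitOn.go.eq_def]
      simp [pvSplit]
    | cons c rest =>
      rw [PySem.Chars.splitOn.go.eq_def]
      simp only [List.isPrefixOf]
      by_cases hc : c = ','
      · subst hc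
        rw [if_pos (by simp)]
        simp only [List.length_cons, List.drop_succ_cons, List.length_nil, List.drop_zero]
        rw [ih rest [] (cur.reverse :: acc)
          (by simpa using Nat.le_of_succ_le_succ (by simpa using h))]
        simp [pvSplit]
      · rw [if_neg (by simp [Ne.symm hc])]
        rw [ih rest (c :: cur) acc (by simpa using Nat.le_of_succ_le_succ (by simpa using h))]
        simp [pvSplit, hc]

-- the value of A's Python loop, as a flatMap
def pvG (x : Char) : List Char := if x = ',' then ['\'', ',', '\''] else [x]

theorem pvFold_eq_flatMap (l : List Char) (acc : List Char) :
    l.foldl (fun new_data x =>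
      if x = ',' then ((new_data ++ ['\'']) ++ [',']) ++ ['\''] else new_data ++ [x]) acc
    = acc ++ l.flatMap pvG := by
  have hf : (fun (new_data : List Char) (x : Char) =>
      if x = ',' then ((new_data ++ ['\'']) ++ [',']) ++ ['\''] else new_data ++ [x])
      = fun new_data x => new_data ++ pvG x := by
    funext a x
    by_cases hx : x = ',' <;> simp [pvG, hx]
  rw [hf, PySem.List.foldl_append_eq_flatMap]

theorem pvSplit_ne_nil (l pre : List Char) : pvSplit pre l ≠ [] := by
  induction l generalizing pre with
  | nil => simp [pvSplit]
  | cons c rest ih =>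
    by_cases hc : c = ',' <;> simp [pvSplit, hc, ih]

theorem pvJoin_pvSplit (l pre : List Char) :
    PySem.Chars.join ['\'', ',', '\''] (pvSplit pre l) = pre ++ l.flatMap pvG := by
  induction l generalizing pre with
  | nil => simp [pvSplit, PySem.Chars.join_singleton]
  | cons c rest ih =>
    by_cases hc : c = ','
    · subst hc
      rw [show pvSplit pre (',' :: rest) = pre :: pvSplit [] rest from by simp [pvSplit]]
      obtain ⟨q, rs, hq⟩ := List.exists_cons_of_ne_nil (pvSplit_ne_nil rest [])
      rw [hq, PySem.Chars.join_cons_cons, ← hq, ih]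
      simp [pvG]
    · simp only [pvSplit, if_neg hc]
      rw [ih]
      simp [pvG, hc]

theorem add_semi_colons_spec' (data : String) :
    add_semi_colons data = add_semi_colons_alt data := by
  apply String.toList_inj.mp
  unfold add_semi_colons add_semi_colons_alt
  rw [pvFold_eq_flatMap]
  unfold PySem.Str.split?
  rw [show PySem.Chars.split? data.toList ",".toList
        = some (PySem.Chars.splitOn data.toList [',']) from rfl]
  unfold PySem.Chars.splitOn
  rw [pvGo_eq_pvSplit _ _ _ _ (Nat.le_succ _)]
  simp only [Option.map_some, Option.getD_some, List.reverse_nil, List.nil_append]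
  rw [PySem.Str.toList_join]
  have hmap : (List.map String.toList (List.map String.ofList (pvSplit [] data.toList)))
      = pvSplit [] data.toList := by
    simp [List.map_map, Function.comp_def]
  rw [hmap,
    show ("','" : String).toList = ['\'', ',', '\''] from rfl,
    pvJoin_pvSplit]
  simp
-- ===== VERDICT (by name: the statement is the Claim_ definition above) =====
theorem add_semi_colons_spec : Claim_equal_add_semi_colons := by
  intro data _
  exact add_semi_colons_spec' data
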